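-- pv_equiv track=rewrite | github.com/virginiadadamo/Modelling-the-phase-separation-of-transcription-factors-on-DNA | general_functions.py | gaps_and_consecutives
-- ===== SOURCE A (Python) =====
-- def gaps_and_consecutives(idx_B_on_DNA):
--
--     """
--     Analyzes a list representing the DNA sites with B bound to them.
--
--     This function takes a list of indices (`idx_B_on_DNA`) and:
--
--     1. Identifies groups of consecutives DNA sites.
--     2. Measures the lengths of these groups (ignoring groups of length 1).
--     3. Calculates the gaps (the number of positions) between groups.
--
--     Args:
--         idx_B_on_DNA (list[int]): A list of integer indices representing positions on DNA.
--
--     Returns: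
--         tuple:
--             - consecutive_B (list[int]): A list of lengths of consecutive groups of indices
--               (groups of length 1 are ignored).
--             - gaps (list[int]): A list of gap sizes between consecutive groups of indices.
--
--     Example:
--         >>> idx_B_on_DNA = [1, 2, 3, 7, 8, 12]
--         >>> gaps_and_consecutives(idx_B_on_DNA)
--         ([3, 2], [3, 3])
--
--         Explanation:
--         - There are two consecutive groups: [1, 2, 3] (length 3) and [7, 8] (length 2).
--         - There are two gaps: 7 - 3 - 1 = 3 and 12 - 8 - 1 = 3.
--
--     Notes:
--         - A group is defined as a sequence of consecutive indices.
--         - A gap is the difference between two non-consecutive indices, minus 1.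
--     """
--
--     consecutive_B = []
--     gaps = []
--     start = 0
--
--     # Loop through the list to find consecutive groups
--     for i in range(1, len(idx_B_on_DNA)):
--         if idx_B_on_DNA[i] != idx_B_on_DNA[i-1] + 1:
--             # If not consecutive, capture the length of the sequence
--             group_length = i - start
--             if group_length > 1:  # Skip groups of length 1
--                 consecutive_B.append(group_length)
--             # Calculate the gap difference
--             gaps.append((idx_B_on_DNA[i] - idx_B_on_DNA[i-1]-1))
--             #The start of the next group
--             start = i
--     # Add the last consecutive group length if > 1
--     group_length = len(idx_B_on_DNA) - start
--     if group_length > 1: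
--         consecutive_B.append(group_length)
--
--     return consecutive_B, gaps
-- ===== SOURCE B (Python) =====
-- def gaps_and_consecutives(idx_B_on_DNA):
--     # Build the explicit list of runs (maximal groups of consecutive indices),
--     # then derive both outputs from the run structure.
--     runs = []
--     for x in idx_B_on_DNA:
--         if runs and x == runs[-1][-1] + 1:
--             runs[-1].append(x)
--         else:
--             runs.append([x])
--     consecutive_B = [len(r) for r in runs if len(r) > 1]
--     gaps = [runs[j + 1][0] - runs[j][-1] - 1 for j in range(len(runs) - 1)]
--     return consecutive_B, gaps
-- ===== Notes on version B (the rewrite author's own statement) =====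
-- stated objective: alternative
-- what changed: B first materialises the list of runs of consecutive indices, then computes group lengths by filtering runs and gaps from adjacent run boundaries, instead of A's single index loop with a sliding start marker.
import Mathlib
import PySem

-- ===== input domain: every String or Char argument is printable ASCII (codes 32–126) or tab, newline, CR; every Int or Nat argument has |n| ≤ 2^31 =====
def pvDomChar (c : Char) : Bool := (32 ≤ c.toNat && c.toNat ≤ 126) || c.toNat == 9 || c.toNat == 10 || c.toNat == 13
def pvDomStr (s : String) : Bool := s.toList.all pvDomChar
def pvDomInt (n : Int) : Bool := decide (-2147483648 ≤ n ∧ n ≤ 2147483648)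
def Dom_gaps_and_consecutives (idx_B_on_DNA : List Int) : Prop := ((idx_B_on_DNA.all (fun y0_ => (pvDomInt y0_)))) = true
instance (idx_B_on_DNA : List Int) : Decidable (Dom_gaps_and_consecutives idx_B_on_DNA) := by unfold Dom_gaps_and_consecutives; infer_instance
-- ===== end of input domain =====

-- B derives both outputs from an explicit list of runs instead of A's index loop with a sliding start marker (alternative decomposition, same cost).


-- ===== PORT A =====
-- A's loop body over i in range(1, len(l)); state = (consecutive_B, gaps, start).
-- Indices i and i-1 are always in range, so pyGetD with default 0 is exact here.
def pvAStep (l : List Int) (st : List Int × List Int × Int) (i : Int) : List Int × List Int × Int :=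
  let (cons, gaps, start) := st
  if PySem.List.pyGetD l i 0 ≠ PySem.List.pyGetD l (i - 1) 0 + 1 then
    let group_length := i - start
    ((if group_length > 1 then cons ++ [group_length] else cons),
     gaps ++ [PySem.List.pyGetD l i 0 - PySem.List.pyGetD l (i - 1) 0 - 1],
     i)
  else st

def gaps_and_consecutives (idx_B_on_DNA : List Int) : List Int × List Int :=
  let st := (PySem.List.pyRange 1 (idx_B_on_DNA.length : Int) 1).foldl (pvAStep idx_B_on_DNA) ([], [], 0)
  let (cons, gaps, start) := st
  let group_length := (idx_B_on_DNA.length : Int) - start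
  ((if group_length > 1 then cons ++ [group_length] else cons), gaps)

-- ===== PORT B =====
-- B builds the list of runs, then filters run lengths and reads gaps off adjacent run boundaries.
def pvRunsStep (runs : List (List Int)) (x : Int) : List (List Int) :=
  match runs.getLast? with
  | some r => if x = r.getLastD 0 + 1 then runs.dropLast ++ [r ++ [x]] else runs ++ [[x]]
  | none => [[x]]

def pvBuildRuns (l : List Int) : List (List Int) := l.foldl pvRunsStep []

def gaps_and_consecutives_alt (idx_B_on_DNA : List Int) : List Int × List Int :=
  let runs := pvBuildRuns idx_B_on_DNA
  let consecutive_B := runs.filterMap (fun r => if (r.length : Int) > 1 then some (r.length : Int) else none)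
  let gaps := (List.range (runs.length - 1)).map
    (fun j => (runs.getD (j + 1) []).headD 0 - (runs.getD j []).getLastD 0 - 1)
  (consecutive_B, gaps)

-- ===== PRECONDITION & SPEC =====
def Spec_gaps_and_consecutives (idx_B_on_DNA : List Int) (out : List Int × List Int) : Prop := out = gaps_and_consecutives_alt idx_B_on_DNA
instance (idx_B_on_DNA : List Int) (out : List Int × List Int) : Decidable (Spec_gaps_and_consecutives idx_B_on_DNA out) := by unfold Spec_gaps_and_consecutives; infer_instance

-- ===== CLAIM (what is proved, stated in full; the proofs are below) =====
def Claim_equal_gaps_and_consecutives : Prop := ∀ (idx_B_on_DNA : List Int), Dom_gaps_and_consecutives idx_B_on_DNA → Spec_gaps_and_consecutives idx_B_on_DNA (gaps_and_consecutives idx_B_on_DNA)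

-- ===== LEMMAS AND PROOFS =====

-- lengths > 1 of a run list, B's filterMap
def pvConsOf (rs : List (List Int)) : List Int :=
  rs.filterMap (fun r => if (r.length : Int) > 1 then some (r.length : Int) else none)

-- gaps between adjacent runs, recursive form
def pvGapsOf : List (List Int) → List Int
  | [] => []
  | [_] => []
  | r :: s :: t => (s.headD 0 - r.getLastD 0 - 1) :: pvGapsOf (s :: t)

-- A's loop state after processing the prefix p
def pvRunsState (p : List Int) : List Int × List Int × Int :=
  let runs := pvBuildRuns p
  (pvConsOf runs.dropLast, pvGapsOf runs, (p.length : Int) - ((runs.getLastD []).length : Int))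

theorem pvBuildRuns_append (p : List Int) (x : Int) :
    pvBuildRuns (p ++ [x]) = pvRunsStep (pvBuildRuns p) x := by
  simp [pvBuildRuns, List.foldl_append]

theorem pvRunsStep_ne_nil (rs : List (List Int)) (x : Int) : pvRunsStep rs x ≠ [] := by
  unfold pvRunsStep
  rcases h : rs.getLast? with _ | r <;> simp only
  · simp
  · split <;> simp

theorem pvBuildRuns_ne_nil (p : List Int) (hp : p ≠ []) : pvBuildRuns p ≠ [] := by
  induction p using List.reverseRecOn with
  | nil => exact absurd rfl hp
  | append_singleton q y ih => rw [pvBuildRuns_append]; exact pvRunsStep_ne_nil _ _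

theorem pvBuildRuns_last_ne_nil (p : List Int) (hp : p ≠ []) :
    (pvBuildRuns p).getLastD [] ≠ [] := by
  induction p using List.reverseRecOn with
  | nil => exact absurd rfl hp
  | append_singleton q y ih =>
    rw [pvBuildRuns_append]
    unfold pvRunsStep
    rcases h : (pvBuildRuns q).getLast? with _ | r <;> simp only
    · simp
    · split <;> simp

theorem pvBuildRuns_last_last (p : List Int) (hp : p ≠ []) :
    ((pvBuildRuns p).getLastD []).getLastD 0 = p.getLastD 0 := by
  induction p using List.reverseRecOn with
  | nil => exact absurd rfl hp
  | append_singleton q y ih =>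
    rw [pvBuildRuns_append]
    unfold pvRunsStep
    rcases h : (pvBuildRuns q).getLast? with _ | r <;> simp only
    · simp
    · split <;> simp

theorem pvConsOf_append (rs rs' : List (List Int)) :
    pvConsOf (rs ++ rs') = pvConsOf rs ++ pvConsOf rs' := by
  simp [pvConsOf]

theorem pvGapsOf_snoc (rs : List (List Int)) (r : List Int) (h : rs ≠ []) :
    pvGapsOf (rs ++ [r]) = pvGapsOf rs ++ [r.headD 0 - (rs.getLastD []).getLastD 0 - 1] := by
  induction rs with
  | nil => exact absurd rfl h
  | cons a t ih =>
    cases t with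
    | nil => simp [pvGapsOf]
    | cons b u =>
      have h2 := ih (by simp)
      simp only [List.cons_append, pvGapsOf] at h2 ⊢
      rw [h2]
      simp

-- gapsOf depends on the last run only through its head
theorem pvGapsOf_snoc_head (rs : List (List Int)) (r r' : List Int)
    (h : r.headD 0 = r'.headD 0) : pvGapsOf (rs ++ [r]) = pvGapsOf (rs ++ [r']) := by
  cases hrs : rs with
  | nil => simp [pvGapsOf]
  | cons a t =>
    rw [pvGapsOf_snoc _ _ (by simp), pvGapsOf_snoc _ _ (by simp), h]

-- B's range-map form of the gaps equals the recursive form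
theorem pvGaps_map_eq (rs : List (List Int)) :
    (List.range (rs.length - 1)).map
      (fun j => (rs.getD (j + 1) []).headD 0 - (rs.getD j []).getLastD 0 - 1) = pvGapsOf rs := by
  induction rs with
  | nil => simp [pvGapsOf]
  | cons a t ih =>
    cases t with
    | nil => simp [pvGapsOf]
    | cons b u =>
      simp only [pvGapsOf, ← ih]
      rw [show (a :: b :: u).length - 1 = (b :: u).length - 1 + 1 by simp,
        List.range_succ_eq_map]
      simp [Function.comp]

theorem gaps_and_consecutives_alt_eq (l : List Int) :
    gaps_and_consecutives_alt l = (pvConsOf (pvBuildRuns l), pvGapsOf (pvBuildRuns l)) := by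
  simp only [gaps_and_consecutives_alt]
  rw [pvGaps_map_eq]
  rfl

theorem pv_dropLast_getLastD (runs : List (List Int)) (h : runs ≠ []) :
    runs.dropLast ++ [runs.getLastD []] = runs := by
  induction runs with
  | nil => exact absurd rfl h
  | cons a t ih =>
    cases t with
    | nil => simp
    | cons b u => simpa using ih (by simp)

theorem pv_getLastD_getElem? (p : List Int) : p.getLastD 0 = (p[p.length - 1]?).getD 0 := by
  rw [List.getLastD_eq_getLast?, List.getLast?_eq_getElem?]

theorem pvConsOf_singleton (r : List Int) :
    pvConsOf [r] = if (r.length : Int) > 1 then [(r.length : Int)] else [] := by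
  by_cases h : 1 < r.length <;> simp [pvConsOf, h]

theorem pv_headD_append (r : List Int) (x : Int) (h : r ≠ []) :
    (r ++ [x]).headD 0 = r.headD 0 := by
  cases r with
  | nil => exact absurd rfl h
  | cons a t => simp

theorem pv_step (l : List Int) (m : ℕ) (h1 : 1 ≤ m) (h2 : m < l.length) :
    pvAStep l (pvRunsState (l.take m)) ((m : ℕ) : Int) = pvRunsState (l.take (m + 1)) := by
  have hplen : (l.take m).length = m := List.length_take_of_le (le_of_lt h2)
  have hpne : l.take m ≠ [] := by
    intro h; rw [h] at hplen; simp at hplen; omega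
  have htake : l.take (m + 1) = l.take m ++ [l[m]] := by
    rw [List.take_add_one, List.getElem?_eq_getElem h2]; rfl
  have hrne := pvBuildRuns_ne_nil _ hpne
  have hlastne := pvBuildRuns_last_ne_nil _ hpne
  have hlastlast := pvBuildRuns_last_last _ hpne
  have hsplit := pv_dropLast_getLastD _ hrne
  have g1 : PySem.List.pyGetD l ((m : ℕ) : Int) 0 = l[m] := by
    rw [PySem.List.pyGetD_natCast]
    simp [List.getD, List.getElem?_eq_getElem h2]
  have g0 : PySem.List.pyGetD l (((m : ℕ) : Int) - 1) 0 = (l.take m).getLastD 0 := by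
    have hcast : ((m : ℕ) : Int) - 1 = ((m - 1 : ℕ) : Int) := by omega
    rw [hcast, PySem.List.pyGetD_natCast, pv_getLastD_getElem?, hplen,
      List.getElem?_take_of_lt (by omega)]
    simp [List.getD]
  set r := (pvBuildRuns (l.take m)).getLastD [] with hrdef
  have hgl : (pvBuildRuns (l.take m)).getLast? = some r := by
    cases h : (pvBuildRuns (l.take m)).getLast? with
    | none => exact absurd (List.getLast?_eq_none_iff.mp h) hrne
    | some a => rw [hrdef, List.getLastD_eq_getLast?, h]; rfl
  by_cases hc : l[m] = r.getLastD 0 + 1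
  · -- consecutive: the last run is extended, A's state is unchanged
    simp only [pvAStep, pvRunsState, htake, pvBuildRuns_append, pvRunsStep, hgl, g1, g0]
    have hA : ¬ (l[m] ≠ (l.take m).getLastD 0 + 1) := by rw [← hlastlast]; simp [hc]
    rw [if_neg hA, if_pos hc]
    refine congrArg₂ _ ?_ (congrArg₂ _ ?_ ?_)
    · rw [List.dropLast_concat]
    · rw [pvGapsOf_snoc_head _ _ r (pv_headD_append _ _ hlastne), hsplit]
    · simp only [← hrdef, List.getLastD_concat, List.length_append, List.length_cons,
        List.length_nil, hplen]
      push_cast; omega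
  · -- break: A records the group length (if > 1) and the gap, B starts a new run
    simp only [pvAStep, pvRunsState, htake, pvBuildRuns_append, pvRunsStep, hgl, g1, g0]
    have hA : l[m] ≠ (l.take m).getLastD 0 + 1 := by rw [← hlastlast]; exact hc
    rw [if_pos hA, if_neg hc]
    refine congrArg₂ _ ?_ (congrArg₂ _ ?_ ?_)
    · rw [List.dropLast_concat]
      conv_rhs => rw [← hsplit]
      rw [pvConsOf_append, pvConsOf_singleton]
      have harith : ((m : ℕ) : Int) - (((l.take m).length : Int) - (r.length : Int))
          = (r.length : Int) := by rw [hplen]; ring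
      rw [harith]
      split <;> simp
    · rw [pvGapsOf_snoc _ _ hrne, ← hrdef, hlastlast]
      simp
    · simp only [List.getLastD_concat, List.length_append, List.length_cons,
        List.length_nil, hplen]
      push_cast; omega

theorem pv_inv (l : List Int) (m : ℕ) (h1 : 1 ≤ m) (h2 : m ≤ l.length) :
    (PySem.List.pyRange 1 ((m : ℕ) : Int) 1).foldl (pvAStep l) ([], [], 0) =
      pvRunsState (l.take m) := by
  induction m with
  | zero => omega
  | succ k ih =>
    rcases Nat.eq_or_lt_of_le h1 with h | h
    · -- k + 1 = 1
      have hk : k = 0 := by omega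
      subst hk
      rw [show ((1 : ℕ) : Int) = 1 by norm_num, PySem.List.pyRange_one_eq_nil le_rfl]
      cases l with
      | nil => simp at h2
      | cons a t =>
        simp [List.foldl, pvRunsState, pvBuildRuns, pvRunsStep, pvConsOf, pvGapsOf]
    · have hk1 : 1 ≤ k := by omega
      have hk2 : k ≤ l.length := by omega
      have : ((k + 1 : ℕ) : Int) = ((k : ℕ) : Int) + 1 := by push_cast; ring
      rw [this, PySem.List.pyRange_one_succ_right (by exact_mod_cast hk1),
        List.foldl_append]
      simp only [List.foldl]
      rw [ih hk1 hk2, pv_step l k hk1 (by omega)]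

-- ===== VERDICT (by name: the statement is the Claim_ definition above) =====
theorem gaps_and_consecutives_spec : Claim_equal_gaps_and_consecutives := by
  intro l _
  unfold Spec_gaps_and_consecutives
  cases hl : l with
  | nil => decide
  | cons a t =>
    rw [← hl]
    have hlen : 1 ≤ l.length := by rw [hl]; simp
    have hinv := pv_inv l l.length hlen le_rfl
    rw [List.take_length] at hinv
    have hne : l ≠ [] := by rw [hl]; simp
    have hrne := pvBuildRuns_ne_nil _ hne
    have hsplit := pv_dropLast_getLastD _ hrne
    simp only [gaps_and_consecutives]
    rw [hinv, gaps_and_consecutives_alt_eq]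
    simp only [pvRunsState]
    set r := (pvBuildRuns l).getLastD [] with hrdef
    have harith : (l.length : Int) - ((l.length : Int) - (r.length : Int))
        = (r.length : Int) := by ring
    rw [harith]
    refine congrArg₂ _ ?_ rfl
    conv_rhs => rw [← hsplit]
    rw [pvConsOf_append, pvConsOf_singleton]
    split <;> simp
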